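-- pv_equiv track=rewrite | github.com/momo-yh/maskplace | mp_pcb/place_db.py | get_node_id_to_name
-- ===== SOURCE A (Python) =====
-- from operator import itemgetter
--
-- def get_node_id_to_name(node_info, node_to_net_dict):
--     node_name_and_num = []
--     for node_name in node_info:
--         node_name_and_num.append((node_name, len(node_to_net_dict[node_name])))
--     node_name_and_num = sorted(node_name_and_num, key=itemgetter(1), reverse = True)
--     node_id_to_name = [node_name for node_name, _ in node_name_and_num]
--     for i, node_name in enumerate(node_id_to_name):
--         node_info[node_name]["id"] = i
--     return node_id_to_name
-- ===== SOURCE B (Python) =====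
-- def get_node_id_to_name(node_info, node_to_net_dict):
--     pairs = [(name, len(node_to_net_dict[name])) for name in node_info]
--     if not pairs:
--         return []
--     buckets = [[] for _ in range(max(d for _, d in pairs) + 1)]
--     for name, d in pairs:
--         buckets[d].append(name)
--     node_id_to_name = []
--     for d in range(len(buckets) - 1, -1, -1):
--         node_id_to_name.extend(buckets[d])
--     for i, name in enumerate(node_id_to_name):
--         node_info[name]["id"] = i
--     return node_id_to_name
-- ===== Notes on version B (the rewrite author's own statement) =====
-- stated objective: alternative
-- what changed: Replaced the comparison sort (sorted by net-degree, reverse=True) with a stable bucket/counting sort: names are appended to a bucket per degree in input order and the buckets are emitted from the maximum degree down to 0.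
import Mathlib
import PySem

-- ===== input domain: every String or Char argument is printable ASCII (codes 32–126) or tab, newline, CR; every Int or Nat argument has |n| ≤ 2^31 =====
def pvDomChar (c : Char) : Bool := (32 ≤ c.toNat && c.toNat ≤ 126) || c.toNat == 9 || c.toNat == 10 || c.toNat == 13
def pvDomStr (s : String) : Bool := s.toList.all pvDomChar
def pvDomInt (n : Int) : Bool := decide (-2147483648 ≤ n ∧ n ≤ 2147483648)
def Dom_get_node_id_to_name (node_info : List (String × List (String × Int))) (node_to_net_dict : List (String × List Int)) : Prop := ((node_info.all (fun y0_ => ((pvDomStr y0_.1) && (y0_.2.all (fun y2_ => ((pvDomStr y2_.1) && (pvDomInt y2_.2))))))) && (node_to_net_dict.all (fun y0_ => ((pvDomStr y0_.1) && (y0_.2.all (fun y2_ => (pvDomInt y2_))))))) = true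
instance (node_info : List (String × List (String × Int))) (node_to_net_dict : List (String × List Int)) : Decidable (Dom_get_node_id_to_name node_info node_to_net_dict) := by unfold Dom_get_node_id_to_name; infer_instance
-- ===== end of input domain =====

-- B replaces the comparison sort by a stable bucket sort over net-degrees (emitted from max degree down to 0).
-- Both Pythons also assign node ids into node_info in place; the equivalence proved here is about the RETURN value only.

-- ===== PORT A =====
def get_node_id_to_name (node_info : List (String × List (String × Int))) (node_to_net_dict : List (String × List Int)) : List String :=
  let node_name_and_num :=
    node_info.foldl (fun acc p =>
      acc ++ [(p.1, PySem.List.len (PySem.Dict.getD (PySem.Dict.mk node_to_net_dict) p.1 []))]) []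
  let sortedPairs := PySem.List.sorted node_name_and_num (fun p => p.2) true
  let node_id_to_name := sortedPairs.map (fun p => p.1)
  -- the enumerate loop writes ids into node_info in place; it does not affect the return value
  node_id_to_name

-- ===== PORT B =====
def get_node_id_to_name_alt (node_info : List (String × List (String × Int))) (node_to_net_dict : List (String × List Int)) : List String :=
  let pairs := node_info.map (fun p =>
    (p.1, PySem.List.len (PySem.Dict.getD (PySem.Dict.mk node_to_net_dict) p.1 [])))
  if pairs = [] then []
  else
    let m := ((PySem.List.max? (pairs.map Prod.snd) (fun x => x)).getD 0).toNat
    let buckets := pairs.foldl (fun bs p => bs.modify p.2.toNat (fun b => b ++ [p.1]))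
      (List.replicate (m + 1) [])
    -- the enumerate loop writes ids into node_info in place; it does not affect the return value
    (PySem.List.pyRange (PySem.List.len buckets - 1) (-1) (-1)).foldl
      (fun acc d => acc ++ PySem.List.pyGetD buckets d []) []

-- ===== PRECONDITION & SPEC =====
-- Pre_ excludes inputs where some node name of node_info is not a key of node_to_net_dict:
-- there the Python raises KeyError.
def Pre_get_node_id_to_name (node_info : List (String × List (String × Int))) (node_to_net_dict : List (String × List Int)) : Prop :=
  node_info.all (fun p => PySem.Dict.contains (PySem.Dict.mk node_to_net_dict) p.1) = true
instance (node_info : List (String × List (String × Int))) (node_to_net_dict : List (String × List Int)) : Decidable (Pre_get_node_id_to_name node_info node_to_net_dict) := by unfold Pre_get_node_id_to_name; infer_instance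
def pvWitness_get_node_id_to_name : (List (String × List (String × Int))) × (List (String × List Int)) :=
  ([("a", [("x", 1)]), ("b", [])], [("b", [3, 4]), ("a", [5])])

def Spec_get_node_id_to_name (node_info : List (String × List (String × Int))) (node_to_net_dict : List (String × List Int)) (out : List String) : Prop := out = get_node_id_to_name_alt node_info node_to_net_dict
instance (node_info : List (String × List (String × Int))) (node_to_net_dict : List (String × List Int)) (out : List String) : Decidable (Spec_get_node_id_to_name node_info node_to_net_dict out) := by unfold Spec_get_node_id_to_name; infer_instance

-- ===== CLAIM (what is proved, stated in full; the proofs are below) =====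
def Claim_equal_get_node_id_to_name : Prop := ∀ (node_info : List (String × List (String × Int))) (node_to_net_dict : List (String × List Int)), Dom_get_node_id_to_name node_info node_to_net_dict → Pre_get_node_id_to_name node_info node_to_net_dict → Spec_get_node_id_to_name node_info node_to_net_dict (get_node_id_to_name node_info node_to_net_dict)

-- ===== LEMMAS AND PROOFS =====

-- descending concatenation of the per-degree buckets of xs: filter (deg = m) ++ … ++ filter (deg = 0)
def descConcat (m : Nat) (xs : List (String × Int)) : List (String × Int) :=
  match m with
  | 0 => xs.filter (fun p => p.2 == (0 : Int))
  | d + 1 => xs.filter (fun p => p.2 == ((d + 1 : Nat) : Int)) ++ descConcat d xs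

theorem descConcat_nil (m : Nat) : descConcat m [] = [] := by
  induction m with
  | zero => simp [descConcat]
  | succ d ih => simp [descConcat, ih]

theorem mem_descConcat_le {m : Nat} {xs : List (String × Int)} {y : String × Int}
    (h : y ∈ descConcat m xs) : y.2 ≤ (m : Nat) := by
  induction m with
  | zero =>
    simp [descConcat, List.mem_filter] at h
    omega
  | succ d ih =>
    simp only [descConcat, List.mem_append] at h
    rcases h with h | h
    · simp [List.mem_filter] at h
      omega
    · have := ih h
      push_cast
      push_cast at this
      omega

theorem descConcat_snoc_gt {m : Nat} {xs : List (String × Int)} {x : String × Int}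
    (h : (m : Int) < x.2) : descConcat m (xs ++ [x]) = descConcat m xs := by
  induction m with
  | zero =>
    simp only [descConcat, List.filter_append, List.filter_cons, List.filter_nil]
    have : ¬ (x.2 == (0 : Int)) = true := by simp; omega
    simp [this]
  | succ d ih =>
    simp only [descConcat, List.filter_append, List.filter_cons, List.filter_nil]
    have hgt : (d : Int) < x.2 := by push_cast at h ⊢; omega
    have hne : ¬ x.2 = (d : Int) + 1 := by push_cast at h; omega
    simp [ih hgt, hne]

theorem insertBy_append_not_before {α : Type} (bef : α → α → Bool) (x : α) (A B : List α)
    (h : ∀ a ∈ A, bef x a = false) :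
    PySem.List.insertBy bef x (A ++ B) = A ++ PySem.List.insertBy bef x B := by
  induction A with
  | nil => simp
  | cons a t ih =>
    have ha : bef x a = false := h a (by simp)
    simp only [List.cons_append, PySem.List.insertBy, ha]
    simp only [Bool.false_eq_true, if_false]
    rw [ih (fun b hb => h b (by simp [hb]))]

theorem insertBy_all_before {α : Type} (bef : α → α → Bool) (x : α) (ys : List α)
    (h : ∀ y ∈ ys, bef x y = true) :
    PySem.List.insertBy bef x ys = x :: ys := by
  cases ys with
  | nil => rfl
  | cons y t => simp [PySem.List.insertBy, h y (by simp)]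

theorem insertBy_descConcat {m : Nat} (xs : List (String × Int)) (x : String × Int)
    (h0 : 0 ≤ x.2) (hm : x.2 ≤ (m : Nat)) :
    PySem.List.insertBy (fun a b => decide (b.2 < a.2)) x (descConcat m xs)
      = descConcat m (xs ++ [x]) := by
  induction m with
  | zero =>
    have hx : x.2 = 0 := by omega
    simp only [descConcat]
    rw [PySem.List.insertBy_of_forall_not_before]
    · simp [List.filter_append, hx]
    · intro y hy
      simp [List.mem_filter] at hy
      simp [hy.2, hx]
  | succ d ih =>
    simp only [descConcat]
    rw [insertBy_append_not_before]
    · by_cases hx : x.2 = ((d + 1 : Nat) : Int)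
      · rw [insertBy_all_before]
        · simp only [List.filter_append, List.filter_cons, List.filter_nil, hx,
            BEq.rfl, if_true]
          rw [descConcat_snoc_gt (by rw [hx]; push_cast; omega)]
          simp
        · intro y hy
          have := mem_descConcat_le hy
          simp only [decide_eq_true_eq]
          push_cast at this hx ⊢
          omega
      · have hxd : x.2 ≤ (d : Nat) := by push_cast at hm hx ⊢; omega
        rw [ih hxd]
        have hne : ¬ x.2 = (d : Int) + 1 := by push_cast at hx ⊢; omega
        simp [List.filter_append, hne]
    · intro a ha
      simp only [List.mem_filter] at ha
      have : a.2 = ((d + 1 : Nat) : Int) := by simpa using ha.2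
      simp only [decide_eq_false_iff_not, not_lt, this]
      push_cast at hm ⊢
      omega

theorem foldl_insertBy_descConcat {m : Nat} (xs pre : List (String × Int))
    (h : ∀ p ∈ xs, 0 ≤ p.2 ∧ p.2 ≤ (m : Nat)) :
    xs.foldl (fun acc x => PySem.List.insertBy (fun a b => decide (b.2 < a.2)) x acc)
      (descConcat m pre) = descConcat m (pre ++ xs) := by
  induction xs generalizing pre with
  | nil => simp
  | cons x t ih =>
    have hx := h x (by simp)
    simp only [List.foldl_cons]
    rw [insertBy_descConcat pre x hx.1 hx.2,
        ih (pre ++ [x]) (fun p hp => h p (by simp [hp]))]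
    simp

theorem sorted_rev_eq_descConcat {m : Nat} (xs : List (String × Int))
    (h : ∀ p ∈ xs, 0 ≤ p.2 ∧ p.2 ≤ (m : Nat)) :
    PySem.List.sorted xs (fun p => p.2) true = descConcat m xs := by
  rw [PySem.List.sorted_rev_eq_foldl_insertBy]
  have := foldl_insertBy_descConcat (m := m) xs [] h
  rw [descConcat_nil] at this
  simpa using this

-- the bucket-fill fold: bucket d of the result is the (fst of the) degree-d slice of xs
theorem length_foldl_modify (xs : List (String × Int)) (bs : List (List String)) :
    (xs.foldl (fun bs p => bs.modify p.2.toNat (fun b => b ++ [p.1])) bs).length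
      = bs.length := by
  induction xs generalizing bs with
  | nil => rfl
  | cons x t ih => simp [ih, List.length_modify]

theorem foldl_modify_getD (xs : List (String × Int)) (bs : List (List String)) (d : Nat)
    (hd : d < bs.length)
    (h : ∀ p ∈ xs, 0 ≤ p.2 ∧ p.2.toNat < bs.length) :
    (xs.foldl (fun bs p => bs.modify p.2.toNat (fun b => b ++ [p.1])) bs).getD d []
      = bs.getD d [] ++ (xs.filter (fun p => p.2 == (d : Int))).map Prod.fst := by
  induction xs generalizing bs with
  | nil => simp
  | cons x t ih =>
    have hx := h x (by simp)
    simp only [List.foldl_cons]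
    rw [ih (bs.modify x.2.toNat (fun b => b ++ [x.1])) (by simpa [List.length_modify])
        (fun p hp => by simpa [List.length_modify] using h p (by simp [hp]))]
    by_cases hxd : x.2 = (d : Int)
    · have hnat : x.2.toNat = d := by omega
      have hmod : (bs.modify x.2.toNat (fun b => b ++ [x.1])).getD d [] = bs.getD d [] ++ [x.1] := by
        subst hnat
        rw [List.getD_eq_getElem?_getD, List.getElem?_modify, List.getElem?_eq_getElem hx.2]
        simp [List.getD_eq_getElem?_getD, List.getElem?_eq_getElem hx.2]
      have hbeq : (x.2 == (d : Int)) = true := by simpa using hxd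
      simp only [List.getD_eq_getElem?_getD] at hmod
      simp [hmod, hbeq, List.append_assoc]
    · have hnat : x.2.toNat ≠ d := by omega
      rw [List.getD_eq_getElem?_getD, List.getElem?_modify_ne _ _ hnat,
          ← List.getD_eq_getElem?_getD]
      have : ¬ (x.2 == (d : Int)) = true := by simpa using hxd
      simp [this]

-- pyRange(n, -1, -1) = [n, n-1, …, 0]
theorem pyRange_desc (n : Nat) :
    PySem.List.pyRange (n : Int) (-1) (-1) = (List.range (n + 1)).map (fun k : Nat => (n : Int) - (k : Int)) := by
  simp only [PySem.List.pyRange]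
  norm_num
  have h1 : (-1 : Int) < (n : Int) := by omega
  simp [h1, sub_eq_add_neg]

theorem descConcat_eq_flatMap (m : Nat) (xs : List (String × Int)) :
    descConcat m xs
      = (List.range (m + 1)).flatMap (fun k => xs.filter (fun p => p.2 == ((m - k : Nat) : Int))) := by
  induction m with
  | zero => simp [descConcat]
  | succ d ih =>
    rw [List.range_succ_eq_map]
    simp only [descConcat, List.flatMap_cons, List.flatMap_map]
    congr 1
    simpa using ih

-- B's bucket phase, characterised: for admissible degree bounds the descending emission of the
-- filled buckets is the fst-projection of descConcat
theorem buckets_emit_eq (m : Nat) (pairs : List (String × Int))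
    (h : ∀ p ∈ pairs, 0 ≤ p.2 ∧ p.2 ≤ (m : Int)) :
    (PySem.List.pyRange ((m : Int) + 1 - 1) (-1) (-1)).foldl
      (fun acc d => acc ++ PySem.List.pyGetD
        (pairs.foldl (fun bs p => bs.modify p.2.toNat (fun b => b ++ [p.1]))
          (List.replicate (m + 1) [])) d []) []
      = (descConcat m pairs).map Prod.fst := by
  have hrange : ((m : Int) + 1 - 1) = (m : Int) := by ring
  rw [hrange, pyRange_desc, PySem.List.foldl_append_eq_flatMap, List.nil_append,
      List.flatMap_map, descConcat_eq_flatMap, List.map_flatMap]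
  apply List.flatMap_congr
  intro k hk
  have hk' : k ≤ m := by simp [List.mem_range] at hk; omega
  have hcast : (m : Int) - k = ((m - k : Nat) : Int) := by omega
  rw [hcast, PySem.List.pyGetD_natCast,
      foldl_modify_getD pairs _ (m - k) (by simp)
        (fun p hp => ⟨(h p hp).1, by have := (h p hp).2; simp only [List.length_replicate]; omega⟩)]
  simp [List.getD_eq_getElem?_getD]

-- ===== VERDICT (by name: the statement is the Claim_ definition above) =====
theorem get_node_id_to_name_spec : Claim_equal_get_node_id_to_name := by
  intro ni d _hDom _hPre
  unfold Spec_get_node_id_to_name get_node_id_to_name get_node_id_to_name_alt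
  simp only [PySem.List.foldl_append_singleton_eq_map, List.nil_append]
  by_cases hnil : ni.map (fun p => (p.1, PySem.List.len (PySem.Dict.getD (PySem.Dict.mk d) p.1 []))) = []
  · rw [hnil]
    simp [PySem.List.sorted]
  · rw [if_neg hnil]
    set pairs := ni.map (fun p => (p.1, PySem.List.len (PySem.Dict.getD (PySem.Dict.mk d) p.1 []))) with hpairs
    have hnn : ∀ p ∈ pairs, 0 ≤ p.2 := by
      intro p hp
      rw [hpairs] at hp
      simp only [List.mem_map] at hp
      obtain ⟨q, _, rfl⟩ := hp
      simp [PySem.List.len_eq]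
    obtain ⟨M, hM⟩ : ∃ M, PySem.List.max? (pairs.map Prod.snd) (fun x => x) = some M := by
      cases hM : PySem.List.max? (pairs.map Prod.snd) (fun x => x) with
      | none => exact absurd (by simpa using (PySem.List.max?_eq_none_iff _ _).mp hM) hnil
      | some M => exact ⟨M, rfl⟩
    have hMmax : ∀ p ∈ pairs, p.2 ≤ M := by
      intro p hp
      exact PySem.List.max?_isMax hM p.2 (List.mem_map_of_mem hp)
    have hM0 : 0 ≤ M := by
      obtain ⟨p, hp⟩ := List.exists_mem_of_ne_nil pairs hnil
      exact le_trans (hnn p hp) (hMmax p hp)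
    have hMtoNat : ((M.toNat : Nat) : Int) = M := by omega
    rw [hM]
    simp only [Option.getD_some]
    have hlen : (PySem.List.len (pairs.foldl
        (fun bs p => bs.modify p.2.toNat (fun b => b ++ [p.1]))
        (List.replicate (M.toNat + 1) ([] : List String)))) = ((M.toNat : Nat) : Int) + 1 := by
      rw [PySem.List.len_eq, length_foldl_modify]
      simp
    rw [hlen, buckets_emit_eq M.toNat pairs
        (fun p hp => ⟨hnn p hp, by rw [hMtoNat]; exact hMmax p hp⟩),
        sorted_rev_eq_descConcat pairs
        (fun p hp => ⟨hnn p hp, by rw [hMtoNat]; exact hMmax p hp⟩)]
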